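-- pv_equiv track=rewrite | github.com/who-am-i1504/medical_instance | flask_back/flask_back/construct/PduConstruct.py | byte2number2
-- ===== SOURCE A (Python) =====
-- def byte2number2(number):
--     sum = 0
--     i = 0
--     for x in number:
--         if i == 0:
--             sum += x
--         else:
--             sum += x * (256**2)
--         i+=1
--     return sum
-- ===== SOURCE B (Python) =====
-- def byte2number2(number):
--     # Weight every element uniformly by 256**2, then correct the head's weight:
--     # head should weigh 1, so subtract (256**2 - 1) * number[0].
--     if not number:
--         return 0
--     return (256**2) * sum(number) - ((256**2) - 1) * number[0]
-- ===== Notes on version B (the rewrite author's own statement) =====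
-- stated objective: alternative
-- what changed: Replaces A's per-element index branch with a uniform full-weight sum of the whole list followed by one arithmetic correction of the head's weight (65536*sum - 65535*first).
import Mathlib
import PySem

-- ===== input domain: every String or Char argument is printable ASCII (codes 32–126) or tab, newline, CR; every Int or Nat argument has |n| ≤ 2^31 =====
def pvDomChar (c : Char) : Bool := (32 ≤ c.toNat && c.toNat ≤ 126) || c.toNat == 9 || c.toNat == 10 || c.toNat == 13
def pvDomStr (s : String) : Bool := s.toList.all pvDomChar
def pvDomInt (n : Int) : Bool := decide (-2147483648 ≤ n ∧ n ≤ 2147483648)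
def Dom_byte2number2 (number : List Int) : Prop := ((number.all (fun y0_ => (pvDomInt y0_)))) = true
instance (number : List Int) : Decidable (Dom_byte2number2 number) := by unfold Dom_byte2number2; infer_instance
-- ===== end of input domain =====

-- ===== PORT A =====
-- B replaces A's per-index branch loop with a uniform full-weight sum plus one arithmetic
-- correction of the head's weight (alternative decomposition, same cost).
def byte2number2 (number : List Int) : Int :=
  (number.foldl (fun (st : Int × Int) x =>
    (if st.2 = 0 then st.1 + x else st.1 + x * (256^2), st.2 + 1)) (0, 0)).1

-- ===== PORT B =====
def byte2number2_alt (number : List Int) : Int :=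
  match number with
  | [] => 0
  | first :: _ => (256^2) * number.sum - ((256^2) - 1) * first

-- ===== PRECONDITION & SPEC =====
def Spec_byte2number2 (number : List Int) (out : Int) : Prop := out = byte2number2_alt number
instance (number : List Int) (out : Int) : Decidable (Spec_byte2number2 number out) := by unfold Spec_byte2number2; infer_instance

-- ===== CLAIM (what is proved, stated in full; the proofs are below) =====
def Claim_equal_byte2number2 : Prop := ∀ (number : List Int), Dom_byte2number2 number → Spec_byte2number2 number (byte2number2 number)

-- ===== LEMMAS AND PROOFS =====

lemma byte2number2_foldl (rest : List Int) (s i : Int) (hi : 1 ≤ i) :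
    (rest.foldl (fun (st : Int × Int) x =>
      (if st.2 = 0 then st.1 + x else st.1 + x * (256^2), st.2 + 1)) (s, i)).1
    = s + rest.sum * (256^2) := by
  induction rest generalizing s i with
  | nil => simp
  | cons x xs ih =>
    simp only [List.foldl_cons, if_neg (by omega : ¬ i = 0), List.sum_cons]
    rw [ih _ _ (by omega)]
    ring

-- ===== VERDICT (by name: the statement is the Claim_ definition above) =====
theorem byte2number2_spec : Claim_equal_byte2number2 := by
  intro number _
  unfold Spec_byte2number2 byte2number2 byte2number2_alt
  cases number with
  | nil => simp
  | cons x xs =>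
    simp only [List.foldl_cons, reduceIte, List.sum_cons]
    rw [byte2number2_foldl xs (0 + x) (0 + 1) (by omega)]
    ring
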